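-- pv_equiv track=rewrite | github.com/gabmin/study_algorithm | programmers/10/index.py | solution
-- ===== SOURCE A (Python) =====
-- def solution(picks, minerals):
--     answer = 0
--
--     if len(minerals) <= sum(picks) * 5:
--         n = len(minerals)
--     else:
--         n = sum(picks) * 5
--
--     new_minerals = [[0, 0, 0] for _ in range((len(minerals) // 5 + 1))]
--     for i in range(len(minerals)):
--         if minerals[i] == 'diamond':
--             new_minerals[i // 5][0] += 1
--         elif minerals[i] == 'iron':
--             new_minerals[i // 5][1] += 1
--         elif minerals[i] == 'stone':
--             new_minerals[i // 5][2] += 1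
--
--     new_minerals.sort(key=lambda x: (x[0], x[1], x[2]), reverse=True)
--
--     while new_minerals:
--         mineral = new_minerals.pop(0)
--         if picks[0] > 0:
--             answer += mineral[0] * 1 + mineral[1] * 1 + mineral[2] * 1
--             picks[0] -= 1
--         elif picks[1] > 0:
--             answer += mineral[0] * 5 + mineral[1] * 1 + mineral[2] * 1
--             picks[1] -= 1
--         else:
--             answer += mineral[0] * 25 + mineral[1] * 5 + mineral[2] * 1
--             picks[2] -= 1
--
--     return answer
-- ===== SOURCE B (Python) =====
-- # B: base-cost-minus-savings — charge every nonempty 5-mineral chunk at stone-pick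
-- # price, then subtract the savings the diamond/iron picks earn on the best chunks;
-- # no per-chunk tier branching, no pick mutation (A mutates `picks` in place; the
-- # equivalence is about the return value only).
-- def solution(picks, minerals):
--     counts = [(minerals[s:s + 5].count('diamond'),
--                minerals[s:s + 5].count('iron'),
--                minerals[s:s + 5].count('stone'))
--               for s in range(0, len(minerals) + 1, 5)]
--     counts.sort(reverse=True)
--     chunks = [c for c in counts if c != (0, 0, 0)]
--     k = len(chunks)
--     t0 = min(k, max(picks[0], 0))
--     rem = k - t0
--     t1 = min(rem, max(picks[1], 0)) if rem else 0
--     base = sum(25 * d + 5 * i + s for d, i, s in chunks)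
--     save1 = sum(20 * d + 4 * i for d, i, _ in chunks[:t0 + t1])
--     save0 = sum(4 * d for d, _, _ in chunks[:t0])
--     return base - save1 - save0
-- ===== Notes on version B (the rewrite author's own statement) =====
-- stated objective: faster
-- what changed: A drains the sorted chunk list with repeated pop(0) while decrementing picks in place; B never simulates the consumption: it discards empty chunks, computes the two pick-tier thresholds once, and returns total stone-pick cost minus the savings of the better picks on prefix slices of the sorted chunks.
import Mathlib
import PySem

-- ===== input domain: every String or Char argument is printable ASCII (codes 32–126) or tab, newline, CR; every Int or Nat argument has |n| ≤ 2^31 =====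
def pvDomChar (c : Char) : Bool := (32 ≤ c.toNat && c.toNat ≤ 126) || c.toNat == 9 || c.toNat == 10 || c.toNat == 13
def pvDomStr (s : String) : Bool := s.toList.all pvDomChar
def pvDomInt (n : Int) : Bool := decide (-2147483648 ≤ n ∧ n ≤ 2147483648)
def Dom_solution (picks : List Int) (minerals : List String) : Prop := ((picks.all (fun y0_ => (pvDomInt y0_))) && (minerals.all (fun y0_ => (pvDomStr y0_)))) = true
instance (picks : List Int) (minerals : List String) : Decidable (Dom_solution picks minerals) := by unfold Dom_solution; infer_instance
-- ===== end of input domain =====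

-- B replaces A's pop(0)/pick-decrementing consumption loop by a closed computation: drop the
-- empty chunks, compute the two pick-tier thresholds once, and return the total stone-pick cost
-- minus the savings of the better picks on prefix slices of the sorted chunks; the equivalence
-- is about the RETURN value only (A mutates `picks` in place, B does not).

-- ===== PORT A =====
-- A's while-loop: pop(0) from the sorted rows, consuming picks in place.
def solutionLoop (answer : Int) (picks : List Int) (rows : List (Int × Int × Int)) : Int :=
  match rows with
  | [] => answer
  | mineral :: rest =>
    if PySem.List.pyGetD picks 0 0 > 0 then
      solutionLoop (answer + mineral.1 * 1 + mineral.2.1 * 1 + mineral.2.2 * 1)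
        (PySem.List.pySetD picks 0 (PySem.List.pyGetD picks 0 0 - 1)) rest
    else if PySem.List.pyGetD picks 1 0 > 0 then
      solutionLoop (answer + mineral.1 * 5 + mineral.2.1 * 1 + mineral.2.2 * 1)
        (PySem.List.pySetD picks 1 (PySem.List.pyGetD picks 1 0 - 1)) rest
    else
      solutionLoop (answer + mineral.1 * 25 + mineral.2.1 * 5 + mineral.2.2 * 1)
        (PySem.List.pySetD picks 2 (PySem.List.pyGetD picks 2 0 - 1)) rest

def solution (picks : List Int) (minerals : List String) : Int :=
  let answer : Int := 0
  -- A computes `n` and never uses it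
  let _n : Int := if (minerals.length : Int) ≤ picks.sum * 5 then (minerals.length : Int) else picks.sum * 5
  let init : List (Int × Int × Int) := List.replicate (minerals.length / 5 + 1) (0, 0, 0)
  let new_minerals := (PySem.List.pyRange 0 (minerals.length : Int) 1).foldl
    (fun acc i =>
      if PySem.List.pyGetD minerals i "" = "diamond" then
        acc.modify (PySem.Int.floordiv i 5).toNat (fun t => (t.1 + 1, t.2.1, t.2.2))
      else if PySem.List.pyGetD minerals i "" = "iron" then
        acc.modify (PySem.Int.floordiv i 5).toNat (fun t => (t.1, t.2.1 + 1, t.2.2))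
      else if PySem.List.pyGetD minerals i "" = "stone" then
        acc.modify (PySem.Int.floordiv i 5).toNat (fun t => (t.1, t.2.1, t.2.2 + 1))
      else acc) init
  let sortedRows := PySem.List.sorted new_minerals (fun x => toLex (x.1, toLex (x.2.1, x.2.2))) true
  solutionLoop answer picks sortedRows

-- ===== PORT B =====
def solution_alt (picks : List Int) (minerals : List String) : Int :=
  let counts : List (Int × Int × Int) :=
    (PySem.List.pyRange 0 ((minerals.length : Int) + 1) 5).map
      (fun s =>
        (((PySem.List.count (PySem.List.slice minerals (some s) (some (s + 5))) "diamond" : Nat) : Int),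
         ((PySem.List.count (PySem.List.slice minerals (some s) (some (s + 5))) "iron" : Nat) : Int),
         ((PySem.List.count (PySem.List.slice minerals (some s) (some (s + 5))) "stone" : Nat) : Int)))
  let counts := PySem.List.sorted counts (fun x => toLex (x.1, toLex (x.2.1, x.2.2))) true
  let chunks := counts.filter (fun c => decide (c ≠ (0, 0, 0)))
  let k : Int := chunks.length
  let t0 : Int := min k (max (PySem.List.pyGetD picks 0 0) 0)
  let rem : Int := k - t0
  let t1 : Int := if rem ≠ 0 then min rem (max (PySem.List.pyGetD picks 1 0) 0) else 0
  let base := (chunks.map (fun c => 25 * c.1 + 5 * c.2.1 + c.2.2)).sum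
  let save1 := ((PySem.List.slice chunks none (some (t0 + t1))).map (fun c => 20 * c.1 + 4 * c.2.1)).sum
  let save0 := ((PySem.List.slice chunks none (some t0)).map (fun c => 4 * c.1)).sum
  base - save1 - save0

-- ===== PRECONDITION & SPEC =====
-- Pre_ excludes exactly the inputs on which the Python A raises IndexError: picks lacking an
-- index (0, 1 or 2) that the while-loop reaches before the chunks run out.
def Pre_solution (picks : List Int) (minerals : List String) : Prop :=
  picks ≠ [] ∧
    (3 ≤ picks.length ∨
     (picks.length = 2 ∧
       ((minerals.length / 5 : Nat) : Int) + 1 ≤ max (picks.getD 0 0) 0 + max (picks.getD 1 0) 0) ∨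
     (picks.length = 1 ∧
       ((minerals.length / 5 : Nat) : Int) + 1 ≤ max (picks.getD 0 0) 0))
instance (picks : List Int) (minerals : List String) : Decidable (Pre_solution picks minerals) := by unfold Pre_solution; infer_instance
def pvWitness_solution : List Int × List String := ([1, 2, 3], ["diamond", "iron", "stone"])

def Spec_solution (picks : List Int) (minerals : List String) (out : Int) : Prop := out = solution_alt picks minerals
instance (picks : List Int) (minerals : List String) (out : Int) : Decidable (Spec_solution picks minerals out) := by unfold Spec_solution; infer_instance

-- ===== CLAIM (what is proved, stated in full; the proofs are below) =====
def Claim_equal_solution : Prop := ∀ (picks : List Int) (minerals : List String), Dom_solution picks minerals → Pre_solution picks minerals → Spec_solution picks minerals (solution picks minerals)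

-- ===== LEMMAS AND PROOFS =====

-- counting step of A, as a single triple-update
def bump (m : String) (t : Int × Int × Int) : Int × Int × Int :=
  if m = "diamond" then (t.1 + 1, t.2.1, t.2.2)
  else if m = "iron" then (t.1, t.2.1 + 1, t.2.2)
  else if m = "stone" then (t.1, t.2.1, t.2.2 + 1) else t

-- the (diamond, iron, stone) counts of one chunk
def cnt (part : List String) : Int × Int × Int :=
  ((List.count "diamond" part : Int), (List.count "iron" part : Int), (List.count "stone" part : Int))

-- A's consumption of the rows, tier chosen by the remaining-threshold pair
def Bsum : List (Int × Int × Int) → Int → Int → Int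
  | [], _, _ => 0
  | c :: cs, t0, t1 =>
    (if 0 < t0 then c.1 + c.2.1 + c.2.2
     else if 0 < t0 + t1 then 5 * c.1 + c.2.1 + c.2.2
     else 25 * c.1 + 5 * c.2.1 + c.2.2) + Bsum cs (t0 - 1) t1

theorem foldl_modify_length {α β : Type} (l : List β) (idx : β → Nat) (f : β → α → α) (acc : List α) :
    (l.foldl (fun a x => a.modify (idx x) (f x)) acc).length = acc.length := by
  induction l generalizing acc with
  | nil => rfl
  | cons x xs ih => rw [List.foldl_cons, ih, List.length_modify]

theorem foldl_modify_getElem {α β : Type} (l : List β) (idx : β → Nat) (f : β → α → α)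
    (acc : List α) (j : Nat) (hj : j < acc.length) :
    (l.foldl (fun a x => a.modify (idx x) (f x)) acc)[j]'(by rw [foldl_modify_length]; exact hj) =
      (l.filter (fun x => idx x = j)).foldl (fun v x => f x v) acc[j] := by
  induction l generalizing acc with
  | nil => simp
  | cons x xs ih =>
    have hj' : j < (acc.modify (idx x) (f x)).length := by rw [List.length_modify]; exact hj
    have step := ih (acc.modify (idx x) (f x)) hj'
    rw [List.getElem_modify] at step
    refine step.trans ?_
    by_cases h : idx x = j
    · rw [if_pos h]; simp [h]
    · rw [if_neg h]; simp [h]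

theorem foldl_bump (l : List String) (a b c : Int) :
    l.foldl (fun t m => bump m t) (a, b, c) =
      (a + (List.count "diamond" l : Int), b + (List.count "iron" l : Int), c + (List.count "stone" l : Int)) := by
  induction l generalizing a b c with
  | nil => simp
  | cons m l ih =>
    rw [List.foldl_cons]
    by_cases h1 : m = "diamond"
    · subst h1
      rw [show bump "diamond" ((a, b, c) : Int × Int × Int) = (a + 1, b, c) from by simp [bump]]
      rw [ih]
      simp [Prod.ext_iff]
      omega
    · by_cases h2 : m = "iron"
      · subst h2
        rw [show bump "iron" ((a, b, c) : Int × Int × Int) = (a, b + 1, c) from by simp [bump]]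
        rw [ih]
        simp [Prod.ext_iff]
        omega
      · by_cases h3 : m = "stone"
        · subst h3
          rw [show bump "stone" ((a, b, c) : Int × Int × Int) = (a, b, c + 1) from by simp [bump]]
          rw [ih]
          simp [Prod.ext_iff]
          omega
        · rw [show bump m ((a, b, c) : Int × Int × Int) = (a, b, c) from by simp [bump, h1, h2, h3]]
          rw [ih]
          simp [h1, h2, h3]

theorem filter_range_div (n j : Nat) :
    (List.range n).filter (fun i => i / 5 = j) = List.range' (5 * j) (min 5 (n - 5 * j)) := by
  induction n with
  | zero => simp
  | succ n ih =>
    rw [List.range_succ, List.filter_append, ih]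
    by_cases h : n / 5 = j
    · have hle : 5 * j ≤ n ∧ n < 5 * j + 5 := by omega
      have h1 : min 5 (n - 5 * j) = n - 5 * j := by omega
      have h2 : min 5 (n + 1 - 5 * j) = (n - 5 * j) + 1 := by omega
      rw [h1, h2, List.range'_concat]
      simp [h]
      omega
    · have h2 : min 5 (n + 1 - 5 * j) = min 5 (n - 5 * j) := by omega
      simp [h, h2]

theorem map_getD_range' (ms : List String) (a k : Nat) (h : a + k ≤ ms.length) :
    (List.range' a k).map (fun i => ms.getD i "") = (ms.drop a).take k := by
  apply List.ext_getElem
  · simp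
    omega
  · intro t h1 h2
    simp only [List.getElem_map, List.getElem_range', List.getElem_take, List.getElem_drop]
    have ht : a + 1 * t < ms.length := by simp at h1; omega
    rw [List.getD_eq_getElem ms "" ht]
    congr 1
    omega

theorem countA_eq (ms : List String) :
    (List.range ms.length).foldl (fun acc i => acc.modify (i / 5) (bump (ms.getD i "")))
        (List.replicate (ms.length / 5 + 1) ((0, 0, 0) : Int × Int × Int)) =
      (List.range (ms.length / 5 + 1)).map (fun j => cnt ((ms.drop (5 * j)).take 5)) := by
  apply List.ext_getElem
  · rw [foldl_modify_length]
    simp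
  · intro j h1 h2
    have hj : j < (List.replicate (ms.length / 5 + 1) ((0, 0, 0) : Int × Int × Int)).length := by
      rw [foldl_modify_length] at h1
      exact h1
    rw [foldl_modify_getElem (List.range ms.length) (fun i => i / 5)
      (fun i => bump (ms.getD i "")) _ j hj]
    rw [List.getElem_replicate, filter_range_div]
    have hjn : j < ms.length / 5 + 1 := by simpa [foldl_modify_length] using h1
    have hfm : List.foldl (fun v x => bump (ms.getD x "") v) ((0, 0, 0) : Int × Int × Int)
        (List.range' (5 * j) (min 5 (ms.length - 5 * j))) =
        List.foldl (fun t m => bump m t) ((0, 0, 0) : Int × Int × Int)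
          ((List.range' (5 * j) (min 5 (ms.length - 5 * j))).map (fun i => ms.getD i "")) := by
      rw [List.foldl_map]
    rw [hfm, map_getD_range' ms (5 * j) (min 5 (ms.length - 5 * j)) (by omega), foldl_bump,
      List.getElem_map, List.getElem_range]
    have htake : (ms.drop (5 * j)).take (min 5 (ms.length - 5 * j)) = (ms.drop (5 * j)).take 5 := by
      rcases le_total 5 (ms.length - 5 * j) with hc | hc
      · rw [min_eq_left hc]
      · rw [min_eq_right hc, List.take_of_length_le (by simp), List.take_of_length_le (by simp; omega)]
    rw [htake]
    simp [cnt]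

-- A's fold over pyRange is the Nat-range fold above
theorem portA_count_eq (ms : List String) :
    (PySem.List.pyRange 0 (ms.length : Int) 1).foldl
      (fun acc i =>
        if PySem.List.pyGetD ms i "" = "diamond" then
          acc.modify (PySem.Int.floordiv i 5).toNat (fun t => (t.1 + 1, t.2.1, t.2.2))
        else if PySem.List.pyGetD ms i "" = "iron" then
          acc.modify (PySem.Int.floordiv i 5).toNat (fun t => (t.1, t.2.1 + 1, t.2.2))
        else if PySem.List.pyGetD ms i "" = "stone" then
          acc.modify (PySem.Int.floordiv i 5).toNat (fun t => (t.1, t.2.1, t.2.2 + 1))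
        else acc) (List.replicate (ms.length / 5 + 1) ((0, 0, 0) : Int × Int × Int)) =
      (List.range (ms.length / 5 + 1)).map (fun j => cnt ((ms.drop (5 * j)).take 5)) := by
  rw [PySem.List.pyRange_zero_natCast ms.length, List.foldl_map]
  have hidx : ∀ k : Nat, (PySem.Int.floordiv (k : Int) 5).toNat = k / 5 := by
    intro k
    rw [PySem.Int.floordiv_eq_ediv_of_pos (show (0 : Int) < 5 by norm_num)]
    omega
  refine Eq.trans ?_ (countA_eq ms)
  congr 1
  funext acc k
  simp only [PySem.List.pyGetD_natCast, hidx]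
  have hbd : bump "diamond" = fun t : Int × Int × Int => (t.1 + 1, t.2.1, t.2.2) := by
    funext t; simp [bump]
  have hbi : bump "iron" = fun t : Int × Int × Int => (t.1, t.2.1 + 1, t.2.2) := by
    funext t; simp [bump]
  have hbs : bump "stone" = fun t : Int × Int × Int => (t.1, t.2.1, t.2.2 + 1) := by
    funext t; simp [bump]
  rw [List.getD_eq_getElem?_getD]
  split_ifs with h1 h2 h3
  · rw [h1, hbd]
  · rw [h2, hbi]
  · rw [h3, hbs]
  · have hid : bump (ms[k]?.getD "") = id := by
      funext t; simp [bump, h1, h2, h3]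
    rw [hid, List.modify_id]

-- B's chunk list is the same map
theorem portB_counts_eq (ms : List String) :
    (PySem.List.pyRange 0 ((ms.length : Int) + 1) 5).map
      (fun s =>
        ((((PySem.List.count (PySem.List.slice ms (some s) (some (s + 5))) "diamond" : Nat) : Int)),
         (((PySem.List.count (PySem.List.slice ms (some s) (some (s + 5))) "iron" : Nat) : Int)),
         (((PySem.List.count (PySem.List.slice ms (some s) (some (s + 5))) "stone" : Nat) : Int)))) =
      (List.range (ms.length / 5 + 1)).map (fun j => cnt ((ms.drop (5 * j)).take 5)) := by
  rw [PySem.List.pyRange_of_pos 0 ((ms.length : Int) + 1) (by norm_num)]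
  have hlen : (if (0 : Int) < (ms.length : Int) + 1 then
      (((ms.length : Int) + 1 - 0 + 5 - 1) / 5).toNat else 0) = ms.length / 5 + 1 := by
    rw [if_pos (by positivity)]
    omega
  rw [hlen, List.map_map]
  apply List.map_congr_left
  intro j hj
  simp only [Function.comp]
  have h1 : ((0 : Int) + 5 * (j : Int)) = ((5 * j : Nat) : Int) := by push_cast; ring
  rw [h1, show ((5 * j : Nat) : Int) + 5 = ((5 * j : Nat) : Int) + ((5 : Nat) : Int) from by norm_num,
    PySem.List.slice_natCast_add]
  simp [cnt, PySem.List.count_eq]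

-- positional congruence: Bsum only sees, per position, whether it is below t0 resp. t0 + t1
theorem Bsum_congr (cs : List (Int × Int × Int)) (t0 t1 u0 u1 : Int)
    (h : ∀ p : Nat, p < cs.length →
      (((p : Int) < t0) ↔ ((p : Int) < u0)) ∧ (((p : Int) < t0 + t1) ↔ ((p : Int) < u0 + u1))) :
    Bsum cs t0 t1 = Bsum cs u0 u1 := by
  induction cs generalizing t0 t1 u0 u1 with
  | nil => rfl
  | cons c cs ih =>
    obtain ⟨h00, h01⟩ := h 0 (by simp)
    push_cast at h00 h01
    have hterm : ((if 0 < t0 then c.1 + c.2.1 + c.2.2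
        else if 0 < t0 + t1 then 5 * c.1 + c.2.1 + c.2.2
        else 25 * c.1 + 5 * c.2.1 + c.2.2) : Int) =
        (if 0 < u0 then c.1 + c.2.1 + c.2.2
        else if 0 < u0 + u1 then 5 * c.1 + c.2.1 + c.2.2
        else 25 * c.1 + 5 * c.2.1 + c.2.2) := by
      split_ifs <;> first | rfl | omega
    have htail : Bsum cs (t0 - 1) t1 = Bsum cs (u0 - 1) u1 := by
      apply ih
      intro p hp
      obtain ⟨hp0, hp1⟩ := h (p + 1) (by simpa using Nat.succ_lt_succ hp)
      push_cast at hp0 hp1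
      constructor <;> omega
    simp only [Bsum, hterm, htail]

theorem Bsum_append (l z : List (Int × Int × Int)) (t0 t1 : Int) :
    Bsum (l ++ z) t0 t1 = Bsum l t0 t1 + Bsum z (t0 - l.length) t1 := by
  induction l generalizing t0 with
  | nil => simp [Bsum]
  | cons c l ih =>
    simp only [List.cons_append, Bsum, ih, List.length_cons]
    push_cast
    have e : t0 - 1 - (l.length : Int) = t0 - ((l.length : Int) + 1) := by ring
    rw [e]
    ring

theorem Bsum_replicate_zero (m : Nat) (t0 t1 : Int) :
    Bsum (List.replicate m ((0, 0, 0) : Int × Int × Int)) t0 t1 = 0 := by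
  induction m generalizing t0 with
  | zero => rfl
  | succ m ih =>
    rw [List.replicate_succ]
    simp only [Bsum, ih]
    split_ifs <;> norm_num

-- Bsum as "charge everything at the stone tier, subtract prefix savings"
theorem Bsum_eq_sums (cs : List (Int × Int × Int)) (t0 t1 : Int) (h0 : 0 ≤ t0) (h1 : 0 ≤ t1) :
    Bsum cs t0 t1 =
      (cs.map (fun c => 25 * c.1 + 5 * c.2.1 + c.2.2)).sum
        - ((cs.take (t0 + t1).toNat).map (fun c => 20 * c.1 + 4 * c.2.1)).sum
        - ((cs.take t0.toNat).map (fun c => 4 * c.1)).sum := by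
  induction cs generalizing t0 t1 with
  | nil => simp [Bsum]
  | cons c cs ih =>
    by_cases ht0 : 0 < t0
    · have e0 : t0.toNat = (t0 - 1).toNat + 1 := by omega
      have e1 : (t0 + t1).toNat = (t0 - 1 + t1).toNat + 1 := by omega
      rw [e0, e1]
      simp only [Bsum, if_pos ht0, List.take_succ_cons, List.map_cons, List.sum_cons]
      rw [ih (t0 - 1) t1 (by omega) h1]
      ring
    · have ht0' : t0 = 0 := by omega
      subst ht0'
      by_cases ht1 : 0 < t1
      · have e1 : ((0 : Int) + t1).toNat = (t1 - 1).toNat + 1 := by omega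
        rw [e1]
        simp only [Bsum, if_neg (by omega : ¬ (0 : Int) < 0), if_pos (by omega : (0 : Int) < 0 + t1),
          Int.toNat_zero, List.take_zero, List.take_succ_cons, List.map_cons, List.map_nil,
          List.sum_cons, List.sum_nil]
        rw [Bsum_congr cs (0 - 1) t1 0 (t1 - 1) (by intro p hp; constructor <;> omega)]
        rw [ih 0 (t1 - 1) le_rfl (by omega)]
        simp
        ring
      · have ht1' : t1 = 0 := by omega
        subst ht1'
        simp only [Bsum, if_neg (by omega : ¬ (0 : Int) < 0), add_zero, Int.toNat_zero,
          List.take_zero, List.map_nil, List.sum_nil, List.map_cons, List.sum_cons]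
        rw [Bsum_congr cs (0 - 1) 0 0 0 (by intro p hp; constructor <;> omega)]
        rw [ih 0 0 le_rfl le_rfl]
        simp

-- a lex-below-zero triple with nonnegative components is the zero triple
theorem zero_of_key_le (a b c : Int) (ha : 0 ≤ a) (hb : 0 ≤ b) (hc : 0 ≤ c)
    (h : toLex ((a, toLex (b, c)) : Int ×ₗ (Int ×ₗ Int)) ≤ toLex ((0 : Int), toLex ((0 : Int), (0 : Int)))) :
    a = 0 ∧ b = 0 ∧ c = 0 := by
  rw [Prod.Lex.toLex_le_toLex] at h
  rcases h with h | ⟨h1, h2⟩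
  · omega
  · rw [Prod.Lex.toLex_le_toLex] at h2
    rcases h2 with h2 | ⟨h3, h4⟩ <;> omega

-- a descending-sorted list of nonnegative triples is its nonzero part followed by zeros
theorem split_filter (S : List (Int × Int × Int))
    (hpw : S.Pairwise (fun x y =>
      (toLex ((y.1, toLex (y.2.1, y.2.2)) : Int ×ₗ (Int ×ₗ Int))) ≤ toLex ((x.1, toLex (x.2.1, x.2.2)))))
    (hnn : ∀ x ∈ S, 0 ≤ x.1 ∧ 0 ≤ x.2.1 ∧ 0 ≤ x.2.2) :
    ∃ m : Nat, S = S.filter (fun x => decide (x ≠ ((0, 0, 0) : Int × Int × Int))) ++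
      List.replicate m ((0, 0, 0) : Int × Int × Int) := by
  induction S with
  | nil => exact ⟨0, rfl⟩
  | cons c S ih =>
    rw [List.pairwise_cons] at hpw
    obtain ⟨hhead, htail⟩ := hpw
    by_cases hc : c = ((0, 0, 0) : Int × Int × Int)
    · subst hc
      have hz : ∀ x ∈ S, x = ((0, 0, 0) : Int × Int × Int) := by
        intro x hx
        obtain ⟨h1, h2, h3⟩ := hnn x (List.mem_cons_of_mem _ hx)
        obtain ⟨e1, e2, e3⟩ := zero_of_key_le x.1 x.2.1 x.2.2 h1 h2 h3 (hhead x hx)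
        exact Prod.ext e1 (Prod.ext e2 e3)
      refine ⟨S.length + 1, ?_⟩
      have hrep : S = List.replicate S.length ((0, 0, 0) : Int × Int × Int) :=
        List.eq_replicate_of_mem hz
      have hfil : (((0, 0, 0) : Int × Int × Int) :: S).filter
          (fun x => decide (x ≠ ((0, 0, 0) : Int × Int × Int))) = [] := by
        rw [List.filter_eq_nil_iff]
        intro x hx
        rcases List.mem_cons.mp hx with h | h
        · simp [h]
        · simp [hz x h]
      rw [hfil, List.nil_append, List.replicate_succ]
      rw [← hrep]
    · obtain ⟨m, hm⟩ := ih htail (fun x hx => hnn x (List.mem_cons_of_mem _ hx))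
      refine ⟨m, ?_⟩
      rw [List.filter_cons_of_pos (by simp [hc])]
      rw [List.cons_append, ← hm]

-- the core identity: A's consumption of the sorted rows equals B's closed formula
theorem core (S : List (Int × Int × Int)) (p0 p1 : Int)
    (hpw : S.Pairwise (fun x y =>
      (toLex ((y.1, toLex (y.2.1, y.2.2)) : Int ×ₗ (Int ×ₗ Int))) ≤ toLex ((x.1, toLex (x.2.1, x.2.2)))))
    (hnn : ∀ x ∈ S, 0 ≤ x.1 ∧ 0 ≤ x.2.1 ∧ 0 ≤ x.2.2) :
    Bsum S (min (S.length : Int) (max p0 0))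
        (min ((S.length : Int) - min (S.length : Int) (max p0 0)) (max p1 0)) =
      ((S.filter (fun x => decide (x ≠ ((0, 0, 0) : Int × Int × Int)))).map
          (fun c => 25 * c.1 + 5 * c.2.1 + c.2.2)).sum
        - ((PySem.List.slice (S.filter (fun x => decide (x ≠ ((0, 0, 0) : Int × Int × Int)))) none
            (some (min ((S.filter (fun x => decide (x ≠ ((0, 0, 0) : Int × Int × Int)))).length : Int)
                (max p0 0) +
              (if ((S.filter (fun x => decide (x ≠ ((0, 0, 0) : Int × Int × Int)))).length : Int) -
                    min ((S.filter (fun x => decide (x ≠ ((0, 0, 0) : Int × Int × Int)))).length : Int)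
                      (max p0 0) ≠ 0 then
                min (((S.filter (fun x => decide (x ≠ ((0, 0, 0) : Int × Int × Int)))).length : Int) -
                    min ((S.filter (fun x => decide (x ≠ ((0, 0, 0) : Int × Int × Int)))).length : Int)
                      (max p0 0)) (max p1 0)
              else 0)))).map (fun c => 20 * c.1 + 4 * c.2.1)).sum
        - ((PySem.List.slice (S.filter (fun x => decide (x ≠ ((0, 0, 0) : Int × Int × Int)))) none
            (some (min ((S.filter (fun x => decide (x ≠ ((0, 0, 0) : Int × Int × Int)))).length : Int)
                (max p0 0)))).map (fun c => 4 * c.1)).sum := by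
  obtain ⟨m, hm⟩ := split_filter S hpw hnn
  set F := S.filter (fun x => decide (x ≠ ((0, 0, 0) : Int × Int × Int))) with hF
  have hlen : S.length = F.length + m := by
    conv_lhs => rw [hm]
    simp
  have hkey : ∀ u1 : Int,
      (∀ p : Nat, p < F.length →
        ((((p : Int) < min (S.length : Int) (max p0 0)) ↔ ((p : Int) < min (F.length : Int) (max p0 0))) ∧
         (((p : Int) < min (S.length : Int) (max p0 0) +
              min ((S.length : Int) - min (S.length : Int) (max p0 0)) (max p1 0)) ↔
          ((p : Int) < min (F.length : Int) (max p0 0) + u1)))) →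
      Bsum S (min (S.length : Int) (max p0 0))
          (min ((S.length : Int) - min (S.length : Int) (max p0 0)) (max p1 0)) =
        Bsum F (min (F.length : Int) (max p0 0)) u1 := by
    intro u1 hcond
    refine (congrArg (fun l => Bsum l (min (S.length : Int) (max p0 0))
      (min ((S.length : Int) - min (S.length : Int) (max p0 0)) (max p1 0))) hm).trans ?_
    rw [Bsum_append, Bsum_replicate_zero, add_zero]
    exact Bsum_congr F _ _ _ _ hcond
  by_cases hrem : (F.length : Int) - min (F.length : Int) (max p0 0) ≠ 0
  · rw [if_pos hrem]
    rw [hkey (min ((F.length : Int) - min (F.length : Int) (max p0 0)) (max p1 0))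
      (by intro p hp; constructor <;> omega)]
    rw [Bsum_eq_sums F _ _ (by omega) (by omega)]
    rw [PySem.List.slice_to F (show (0 : Int) ≤ min ((F.length : Int)) (max p0 0) +
        min ((F.length : Int) - min ((F.length : Int)) (max p0 0)) (max p1 0) by omega)]
    rw [PySem.List.slice_to F (show (0 : Int) ≤ min ((F.length : Int)) (max p0 0) by omega)]
  · rw [if_neg hrem]
    rw [hkey 0 (by intro p hp; constructor <;> omega)]
    rw [Bsum_eq_sums F _ _ (by omega) le_rfl]
    rw [PySem.List.slice_to F (show (0 : Int) ≤ min ((F.length : Int)) (max p0 0) + 0 by omega)]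
    rw [PySem.List.slice_to F (show (0 : Int) ≤ min ((F.length : Int)) (max p0 0) by omega)]

-- A's pop(0) loop computes Bsum with the clamped pick thresholds
theorem pick_facts0 (ps : List Int) (h : 0 < PySem.List.pyGetD ps 0 0) :
    PySem.List.pyGetD (PySem.List.pySetD ps 0 (PySem.List.pyGetD ps 0 0 - 1)) 0 0 =
        PySem.List.pyGetD ps 0 0 - 1 ∧
      PySem.List.pyGetD (PySem.List.pySetD ps 0 (PySem.List.pyGetD ps 0 0 - 1)) 1 0 =
        PySem.List.pyGetD ps 1 0 := by
  cases ps with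
  | nil => simp [PySem.List.pyGetD_zero] at h
  | cons a l =>
    constructor <;>
      simp [PySem.List.pySetD, PySem.List.pySet?, PySem.List.pyIdx?,
        PySem.List.pyGetD_ofNat', List.getD]

theorem pick_facts1 (ps : List Int) (h : 0 < PySem.List.pyGetD ps 1 0) :
    PySem.List.pyGetD (PySem.List.pySetD ps 1 (PySem.List.pyGetD ps 1 0 - 1)) 0 0 =
        PySem.List.pyGetD ps 0 0 ∧
      PySem.List.pyGetD (PySem.List.pySetD ps 1 (PySem.List.pyGetD ps 1 0 - 1)) 1 0 =
        PySem.List.pyGetD ps 1 0 - 1 := by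
  match ps with
  | [] => simp [PySem.List.pyGetD_ofNat'] at h
  | [a] => simp [PySem.List.pyGetD_ofNat', List.getD] at h
  | a :: b :: l =>
    constructor <;>
      simp [PySem.List.pySetD, PySem.List.pySet?, PySem.List.pyIdx?,
        PySem.List.pyGetD_ofNat', List.getD]

theorem pick_facts2 (ps : List Int) (v : Int) :
    PySem.List.pyGetD (PySem.List.pySetD ps 2 v) 0 0 = PySem.List.pyGetD ps 0 0 ∧
      PySem.List.pyGetD (PySem.List.pySetD ps 2 v) 1 0 = PySem.List.pyGetD ps 1 0 := by
  match ps with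
  | [] => simp [PySem.List.pySetD, PySem.List.pySet?, PySem.List.pyIdx?]
  | [a] =>
    constructor <;>
      simp [PySem.List.pySetD, PySem.List.pySet?, PySem.List.pyIdx?,
        PySem.List.pyGetD_ofNat', List.getD]
  | [a, b] =>
    constructor <;>
      simp [PySem.List.pySetD, PySem.List.pySet?, PySem.List.pyIdx?,
        PySem.List.pyGetD_ofNat', List.getD]
  | a :: b :: c :: l =>
    constructor <;>
    · simp [PySem.List.pySetD, PySem.List.pySet?, PySem.List.pyIdx?,
        PySem.List.pyGetD_ofNat', List.getD, List.set]
      split_ifs <;> simp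

theorem Aloop_eq (cs : List (Int × Int × Int)) (ps : List Int) (ans : Int) :
    solutionLoop ans ps cs =
      ans + Bsum cs (min (cs.length : Int) (max (PySem.List.pyGetD ps 0 0) 0))
        (min ((cs.length : Int) - min (cs.length : Int) (max (PySem.List.pyGetD ps 0 0) 0))
          (max (PySem.List.pyGetD ps 1 0) 0)) := by
  induction cs generalizing ps ans with
  | nil => simp [solutionLoop, Bsum]
  | cons c cs ih =>
    have hlen : (((c :: cs).length : Nat) : Int) = (cs.length : Int) + 1 := by
      push_cast [List.length_cons]
      omega
    by_cases h1 : PySem.List.pyGetD ps 0 0 > 0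
    · obtain ⟨hg0, hg1⟩ := pick_facts0 ps h1
      rw [show solutionLoop ans ps (c :: cs) =
          solutionLoop (ans + c.1 * 1 + c.2.1 * 1 + c.2.2 * 1)
            (PySem.List.pySetD ps 0 (PySem.List.pyGetD ps 0 0 - 1)) cs from by
        simp only [solutionLoop]; rw [if_pos h1]]
      rw [ih, hg0, hg1]
      simp only [Bsum, hlen]
      rw [if_pos (by omega)]
      have e0 : min ((cs.length : Int)) (max (PySem.List.pyGetD ps 0 0 - 1) 0) =
          min ((cs.length : Int) + 1) (max (PySem.List.pyGetD ps 0 0) 0) - 1 := by omega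
      have e1 : min ((cs.length : Int) - min ((cs.length : Int)) (max (PySem.List.pyGetD ps 0 0 - 1) 0))
            (max (PySem.List.pyGetD ps 1 0) 0) =
          min ((cs.length : Int) + 1 - min ((cs.length : Int) + 1) (max (PySem.List.pyGetD ps 0 0) 0))
            (max (PySem.List.pyGetD ps 1 0) 0) := by omega
      rw [e1, e0]
      ring
    · by_cases h2 : PySem.List.pyGetD ps 1 0 > 0
      · obtain ⟨hg0, hg1⟩ := pick_facts1 ps h2
        rw [show solutionLoop ans ps (c :: cs) =
            solutionLoop (ans + c.1 * 5 + c.2.1 * 1 + c.2.2 * 1)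
              (PySem.List.pySetD ps 1 (PySem.List.pyGetD ps 1 0 - 1)) cs from by
          simp only [solutionLoop]; rw [if_neg h1, if_pos h2]]
        rw [ih, hg0, hg1]
        simp only [Bsum, hlen]
        rw [if_neg (by omega), if_pos (by omega)]
        rw [Bsum_congr cs
          (min ((cs.length : Int)) (max (PySem.List.pyGetD ps 0 0) 0))
          (min ((cs.length : Int) - min ((cs.length : Int)) (max (PySem.List.pyGetD ps 0 0) 0))
            (max (PySem.List.pyGetD ps 1 0 - 1) 0))
          (min ((cs.length : Int) + 1) (max (PySem.List.pyGetD ps 0 0) 0) - 1)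
          (min ((cs.length : Int) + 1 - min ((cs.length : Int) + 1) (max (PySem.List.pyGetD ps 0 0) 0))
            (max (PySem.List.pyGetD ps 1 0) 0))
          (by intro p hp; constructor <;> omega)]
        ring
      · obtain ⟨hg0, hg1⟩ := pick_facts2 ps (PySem.List.pyGetD ps 2 0 - 1)
        rw [show solutionLoop ans ps (c :: cs) =
            solutionLoop (ans + c.1 * 25 + c.2.1 * 5 + c.2.2 * 1)
              (PySem.List.pySetD ps 2 (PySem.List.pyGetD ps 2 0 - 1)) cs from by
          simp only [solutionLoop]; rw [if_neg h1, if_neg h2]]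
        rw [ih, hg0, hg1]
        simp only [Bsum, hlen]
        rw [if_neg (by omega), if_neg (by omega)]
        rw [Bsum_congr cs
          (min ((cs.length : Int)) (max (PySem.List.pyGetD ps 0 0) 0))
          (min ((cs.length : Int) - min ((cs.length : Int)) (max (PySem.List.pyGetD ps 0 0) 0))
            (max (PySem.List.pyGetD ps 1 0) 0))
          (min ((cs.length : Int) + 1) (max (PySem.List.pyGetD ps 0 0) 0) - 1)
          (min ((cs.length : Int) + 1 - min ((cs.length : Int) + 1) (max (PySem.List.pyGetD ps 0 0) 0))
            (max (PySem.List.pyGetD ps 1 0) 0))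
          (by intro p hp; constructor <;> omega)]
        ring

-- ===== VERDICT (by name: the statement is the Claim_ definition above) =====
theorem solution_spec : Claim_equal_solution := by
  unfold Claim_equal_solution
  intro picks minerals _ _
  unfold Spec_solution solution solution_alt
  simp only [portA_count_eq, portB_counts_eq]
  rw [Aloop_eq, zero_add, PySem.List.length_sorted]
  refine Eq.trans ?_ (core (PySem.List.sorted
      ((List.range (minerals.length / 5 + 1)).map (fun j => cnt ((minerals.drop (5 * j)).take 5)))
      (fun x => toLex (x.1, toLex (x.2.1, x.2.2))) true)
    (PySem.List.pyGetD picks 0 0) (PySem.List.pyGetD picks 1 0)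
    (PySem.List.sorted_pairwise_rev _ _) ?_)
  · rw [PySem.List.length_sorted, List.length_map, List.length_range]
  · intro x hx
    rw [PySem.List.mem_sorted] at hx
    obtain ⟨j, hj, rfl⟩ := List.mem_map.mp hx
    refine ⟨?_, ?_, ?_⟩ <;> simp [cnt]
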